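-- pv_equiv track=rewrite | github.com/Aqudi/t5-for-ner | data/preprocess_data_for_t2t.py | create_examples_by_tags
-- ===== SOURCE A (Python) =====
-- tags = ["QT", "PS", "LC", "DT", "TI", "OG"]
--
-- tag_descriptions = ["수량", "사람", "장소", "날짜", "시간", "기관"]
--
-- def create_examples_by_tags(original_example, labels):
--     results = []
--     label_by_tags = {tag: [] for tag in tags}
--     for label in labels:
--         label_by_tags[label[1]].append(f"{label[1]}:{label[0]}")
--
--     for tag, desc in zip(tags, tag_descriptions):
--         current_labels = label_by_tags.get(tag)
--         label_str = "O"
--         if current_labels: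
--             label_str = ",".join(current_labels)
--         example = f"[sentence] {original_example.strip()} [tag] {tag}:{desc}\t[label] {label_str}"
--         results.append(example)
--     return results
-- ===== SOURCE B (Python) =====
-- tags = ["QT", "PS", "LC", "DT", "TI", "OG"]
--
-- tag_descriptions = ["수량", "사람", "장소", "날짜", "시간", "기관"]
--
-- def create_examples_by_tags(original_example, labels):
--     sentence = original_example.strip()
--     results = []
--     for tag, desc in zip(tags, tag_descriptions):
--         parts = [f"{tag}:{text}" for text, t in labels if t == tag]
--         label_str = ",".join(parts) if parts else "O"
--         results.append(f"[sentence] {sentence} [tag] {tag}:{desc}\t[label] {label_str}")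
--     return results
-- ===== Notes on version B (the rewrite author's own statement) =====
-- stated objective: simpler
-- what changed: Drops the pre-built tag->list dict entirely: B does one filter-and-format scan of labels per tag inside the single output loop, instead of A's bucketing pass into a dict followed by a table-driven lookup pass.
import Mathlib
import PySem

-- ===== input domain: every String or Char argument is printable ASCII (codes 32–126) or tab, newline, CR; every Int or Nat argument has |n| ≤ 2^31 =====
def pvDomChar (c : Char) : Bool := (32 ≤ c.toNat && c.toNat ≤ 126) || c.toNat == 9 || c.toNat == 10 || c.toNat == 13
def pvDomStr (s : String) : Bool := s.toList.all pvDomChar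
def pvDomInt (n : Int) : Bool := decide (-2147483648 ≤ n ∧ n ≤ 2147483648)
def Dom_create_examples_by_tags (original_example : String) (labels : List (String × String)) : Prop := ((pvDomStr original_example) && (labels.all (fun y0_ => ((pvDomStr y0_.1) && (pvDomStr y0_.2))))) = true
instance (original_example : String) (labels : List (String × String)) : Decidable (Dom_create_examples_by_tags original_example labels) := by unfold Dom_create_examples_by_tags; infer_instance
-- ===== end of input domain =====

-- B drops A's dict-bucketing pass: one filter-and-format scan of labels per tag (simpler decomposition, same cost).


-- ===== PORT A =====
def pvTags : List String := ["QT", "PS", "LC", "DT", "TI", "OG"]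
def pvTagDescs : List String := ["수량", "사람", "장소", "날짜", "시간", "기관"]

def create_examples_by_tags (original_example : String) (labels : List (String × String)) : List String :=
  let d0 : PySem.Dict String (List String) :=
    pvTags.foldl (fun d tag => d.insert tag []) PySem.Dict.empty
  -- label_by_tags[label[1]].append(...): under Pre_ the key is always present, so Dict.modify is exact
  let label_by_tags := labels.foldl
    (fun d label => d.modify label.2 [] (fun cur => cur ++ [label.2 ++ ":" ++ label.1])) d0
  (pvTags.zip pvTagDescs).foldl (fun results td =>
    let current_labels := label_by_tags.getD td.1 []
    let label_str := if current_labels ≠ [] then PySem.Str.join "," current_labels else "O"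
    results ++ ["[sentence] " ++ PySem.Str.strip original_example ++ " [tag] " ++ td.1 ++ ":" ++ td.2 ++ "\t[label] " ++ label_str]) []

-- ===== PORT B =====
def create_examples_by_tags_alt (original_example : String) (labels : List (String × String)) : List String :=
  let sentence := PySem.Str.strip original_example
  (pvTags.zip pvTagDescs).map (fun td =>
    let parts := (labels.filter (fun l => l.2 == td.1)).map (fun l => td.1 ++ ":" ++ l.1)
    let label_str := if parts ≠ [] then PySem.Str.join "," parts else "O"
    "[sentence] " ++ sentence ++ " [tag] " ++ td.1 ++ ":" ++ td.2 ++ "\t[label] " ++ label_str)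

-- ===== PRECONDITION & SPEC =====
-- Pre_ excludes exactly the inputs on which Python A raises KeyError: a label whose tag is not one of the six known tags.
def Pre_create_examples_by_tags (original_example : String) (labels : List (String × String)) : Prop :=
  ∀ l ∈ labels, l.2 ∈ pvTags
instance (original_example : String) (labels : List (String × String)) : Decidable (Pre_create_examples_by_tags original_example labels) := by unfold Pre_create_examples_by_tags; infer_instance
def pvWitness_create_examples_by_tags : String × (List (String × String)) := (" hi ", [("x", "QT"), ("y", "PS"), ("z", "QT")])


def Spec_create_examples_by_tags (original_example : String) (labels : List (String × String)) (out : List String) : Prop := out = create_examples_by_tags_alt original_example labels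
instance (original_example : String) (labels : List (String × String)) (out : List String) : Decidable (Spec_create_examples_by_tags original_example labels out) := by unfold Spec_create_examples_by_tags; infer_instance

-- ===== CLAIM (what is proved, stated in full; the proofs are below) =====
def Claim_equal_create_examples_by_tags : Prop := ∀ (original_example : String) (labels : List (String × String)), Dom_create_examples_by_tags original_example labels → Pre_create_examples_by_tags original_example labels → Spec_create_examples_by_tags original_example labels (create_examples_by_tags original_example labels)

-- ===== LEMMAS AND PROOFS =====

-- the bucketing fold of A, characterised per key: what getD t returns after the whole loop
theorem pv_getD_fold (labels : List (String × String)) (d : PySem.Dict String (List String)) (t : String) :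
    (labels.foldl (fun d label => d.modify label.2 [] (fun cur => cur ++ [label.2 ++ ":" ++ label.1])) d).getD t []
    = d.getD t [] ++ (labels.filter (fun l => l.2 == t)).map (fun l => t ++ ":" ++ l.1) := by
  induction labels generalizing d with
  | nil => simp
  | cons l ls ih =>
    simp only [List.foldl_cons, ih, List.filter_cons]
    by_cases h : l.2 = t
    · subst h
      simp
    · simp [PySem.Dict.getD_modify, h, Ne.symm h]

-- ===== VERDICT (by name: the statement is the Claim_ definition above) =====
theorem create_examples_by_tags_spec : Claim_equal_create_examples_by_tags := by
  intro original_example labels _ _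
  unfold Spec_create_examples_by_tags create_examples_by_tags create_examples_by_tags_alt
  simp only [pvTags, pvTagDescs, List.zip_cons_cons, List.zip_nil_right, List.foldl_cons,
    List.foldl_nil, List.map_cons, List.map_nil, pv_getD_fold]
  rfl
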